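-- pv_equiv track=rewrite | github.com/neno-is-ooo/batch-transcriber | workers/faster-whisper-batch/faster_whisper_batch/gpu_utils.py | get_fallback_chain
-- ===== SOURCE A (Python) =====
-- CPU_DEVICE = "cpu"
--
-- CUDA_DEVICE = "cuda"
--
-- CPU_COMPUTE_TYPE = "int8"
--
-- CUDA_COMPUTE_TYPE = "float16"
--
-- CUDA_LOW_VRAM_COMPUTE_TYPE = "int8_float16"
--
-- def get_fallback_chain(device: str, compute_type: str) -> list[tuple[str, str]]:
--     normalized_device = device.strip().lower() or CPU_DEVICE
--     normalized_compute = compute_type.strip().lower() or CPU_COMPUTE_TYPE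
--
--     chain: list[tuple[str, str]] = [(normalized_device, normalized_compute)]
--
--     if normalized_device == CUDA_DEVICE:
--         if normalized_compute == CUDA_COMPUTE_TYPE:
--             chain.append((CUDA_DEVICE, CUDA_LOW_VRAM_COMPUTE_TYPE))
--             chain.append((CPU_DEVICE, CPU_COMPUTE_TYPE))
--         elif normalized_compute == CUDA_LOW_VRAM_COMPUTE_TYPE:
--             chain.append((CPU_DEVICE, CPU_COMPUTE_TYPE))
--         elif normalized_compute != CPU_COMPUTE_TYPE:
--             chain.append((CUDA_DEVICE, CUDA_LOW_VRAM_COMPUTE_TYPE))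
--             chain.append((CPU_DEVICE, CPU_COMPUTE_TYPE))
--     elif normalized_compute != CPU_COMPUTE_TYPE:
--         chain.append((CPU_DEVICE, CPU_COMPUTE_TYPE))
--
--     deduped: list[tuple[str, str]] = []
--     for candidate in chain:
--         if candidate not in deduped:
--             deduped.append(candidate)
--
--     return deduped
-- ===== SOURCE B (Python) =====
-- CPU_DEVICE = "cpu"
-- CUDA_DEVICE = "cuda"
-- CPU_COMPUTE_TYPE = "int8"
-- CUDA_COMPUTE_TYPE = "float16"
-- CUDA_LOW_VRAM_COMPUTE_TYPE = "int8_float16"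
--
-- FALLBACK_STAGES = {
--     CUDA_DEVICE: [(CUDA_DEVICE, CUDA_LOW_VRAM_COMPUTE_TYPE), (CPU_DEVICE, CPU_COMPUTE_TYPE)],
-- }
--
--
-- def get_fallback_chain(device: str, compute_type: str) -> list[tuple[str, str]]:
--     normalized_device = device.strip().lower() or CPU_DEVICE
--     normalized_compute = compute_type.strip().lower() or CPU_COMPUTE_TYPE
--     head = (normalized_device, normalized_compute)
--     if normalized_compute == CPU_COMPUTE_TYPE:
--         return [head]
--     stages = FALLBACK_STAGES.get(normalized_device, [(CPU_DEVICE, CPU_COMPUTE_TYPE)])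
--     return [head] + [stage for stage in stages if stage != head]
-- ===== Notes on version B (the rewrite author's own statement) =====
-- stated objective: simpler
-- what changed: Replaces the four-way nested if/elif plus a generic first-occurrence dedup loop by a dispatch table of fallback stages keyed by device, gated by compute != int8, with duplicates removed by a single filter against the head pair.
import Mathlib
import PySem

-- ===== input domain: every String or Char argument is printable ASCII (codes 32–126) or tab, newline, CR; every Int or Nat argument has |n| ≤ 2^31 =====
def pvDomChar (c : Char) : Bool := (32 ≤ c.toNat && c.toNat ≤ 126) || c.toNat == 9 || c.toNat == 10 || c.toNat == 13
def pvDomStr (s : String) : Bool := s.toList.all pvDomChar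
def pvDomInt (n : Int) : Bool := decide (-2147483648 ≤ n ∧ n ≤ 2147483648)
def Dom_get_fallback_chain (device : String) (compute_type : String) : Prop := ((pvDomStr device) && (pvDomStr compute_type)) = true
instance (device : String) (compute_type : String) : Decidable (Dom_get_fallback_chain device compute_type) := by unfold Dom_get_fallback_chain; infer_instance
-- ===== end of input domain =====

-- B replaces A's nested device/compute if/elif and generic dedup loop with a dispatch table
-- of fallback stages plus a single filter against the head pair (objective: simpler).


-- ===== PORT A =====
def get_fallback_chain (device : String) (compute_type : String) : List (String × String) :=
  let sd := PySem.Str.lower (PySem.Str.strip device)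
  let normalized_device := if sd = "" then "cpu" else sd
  let sc := PySem.Str.lower (PySem.Str.strip compute_type)
  let normalized_compute := if sc = "" then "int8" else sc
  let chain : List (String × String) :=
    [(normalized_device, normalized_compute)] ++
      (if normalized_device = "cuda" then
        if normalized_compute = "float16" then
          [("cuda", "int8_float16"), ("cpu", "int8")]
        else if normalized_compute = "int8_float16" then
          [("cpu", "int8")]
        else if normalized_compute ≠ "int8" then
          [("cuda", "int8_float16"), ("cpu", "int8")]
        else []
      else if normalized_compute ≠ "int8" then
        [("cpu", "int8")]
      else [])
  chain.foldl (fun deduped candidate =>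
    if candidate ∈ deduped then deduped else deduped ++ [candidate]) []

-- ===== PORT B =====
def pvFallbackStages : PySem.Dict String (List (String × String)) :=
  PySem.Dict.ofList [("cuda", [("cuda", "int8_float16"), ("cpu", "int8")])]

def get_fallback_chain_alt (device : String) (compute_type : String) : List (String × String) :=
  let sd := PySem.Str.lower (PySem.Str.strip device)
  let normalized_device := if sd = "" then "cpu" else sd
  let sc := PySem.Str.lower (PySem.Str.strip compute_type)
  let normalized_compute := if sc = "" then "int8" else sc
  let head := (normalized_device, normalized_compute)
  if normalized_compute = "int8" then [head]
  else
    let stages := PySem.Dict.getD pvFallbackStages normalized_device [("cpu", "int8")]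
    head :: stages.filter (fun stage => stage != head)

-- ===== PRECONDITION & SPEC =====
def Spec_get_fallback_chain (device : String) (compute_type : String) (out : List (String × String)) : Prop := out = get_fallback_chain_alt device compute_type
instance (device : String) (compute_type : String) (out : List (String × String)) : Decidable (Spec_get_fallback_chain device compute_type out) := by unfold Spec_get_fallback_chain; infer_instance

-- ===== CLAIM (what is proved, stated in full; the proofs are below) =====
def Claim_equal_get_fallback_chain : Prop := ∀ (device : String) (compute_type : String), Dom_get_fallback_chain device compute_type → Spec_get_fallback_chain device compute_type (get_fallback_chain device compute_type)

-- ===== LEMMAS AND PROOFS =====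

lemma pvFallbackStages_items :
    pvFallbackStages.items = [("cuda", [("cuda", "int8_float16"), ("cpu", "int8")])] := by
  decide

-- the whole equivalence, stated over the already-normalized device/compute strings
lemma core (nd nc : String) :
    (([(nd, nc)] ++
      (if nd = "cuda" then
        if nc = "float16" then [("cuda", "int8_float16"), ("cpu", "int8")]
        else if nc = "int8_float16" then [("cpu", "int8")]
        else if nc ≠ "int8" then [("cuda", "int8_float16"), ("cpu", "int8")]
        else []
      else if nc ≠ "int8" then [("cpu", "int8")] else [])).foldl
        (fun deduped candidate =>
          if candidate ∈ deduped then deduped else deduped ++ [candidate]) [])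
    = (if nc = "int8" then [(nd, nc)]
       else (nd, nc) ::
         (PySem.Dict.getD pvFallbackStages nd [("cpu", "int8")]).filter
           (fun stage => stage != (nd, nc))) := by
  by_cases hd : nd = "cuda"
  · subst hd
    by_cases h1 : nc = "float16"
    · subst h1; decide
    · by_cases h2 : nc = "int8_float16"
      · subst h2; decide
      · by_cases h3 : nc = "int8"
        · subst h3; decide
        · simp [h1, h2, h3, PySem.Dict.getD, PySem.Dict.get?,
            pvFallbackStages_items, List.foldl, List.filter,
            bne, BEq.beq, Prod.mk.injEq, Ne.symm h2, Ne.symm h3]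
  · by_cases h3 : nc = "int8"
    · subst h3
      simp [hd, List.foldl]
    · simp [hd, h3, PySem.Dict.getD, PySem.Dict.get?,
        pvFallbackStages_items, List.find?, List.foldl, List.filter, beq_iff_eq,
        bne_iff_ne, Prod.mk.injEq, Ne.symm hd, Ne.symm h3]

-- ===== VERDICT (by name: the statement is the Claim_ definition above) =====
theorem get_fallback_chain_spec : Claim_equal_get_fallback_chain := by
  intro device compute_type _
  unfold Spec_get_fallback_chain get_fallback_chain get_fallback_chain_alt
  exact core _ _
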